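-- pv_equiv track=rewrite | github.com/grysik666/Team-Project | Algorithm.py | update_R
-- ===== SOURCE A (Python) =====
-- def update_R(R, M, IsCentre: bool):
--     """[Function deletes from list R nodes which already are in perfect matching M.]
--
--     Returns:
--         [list]: [Updated list R.]
--     """
--     if IsCentre:
--         i = 0
--     else:
--         i = 1
--     for pairs in M:
--         if pairs[i] in R:
--             R = delete_element_from_list(R, pairs[i])
--         if R == None:
--             return []
--     return R
--
-- def delete_element_from_list(L, x):
--     """[Function deletes particular element from list.]
--
--         Returns:
--             [list]: [List without particular element.]
--     """
--     for i in range(len(L)):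
--         if L[i] == x:
--             return L[:i] + L[i + 1:]
--     return L
-- ===== SOURCE B (Python) =====
-- def update_R(R, M, IsCentre: bool):
--     i = 0 if IsCentre else 1
--     cnt = {}
--     for pairs in M:
--         v = pairs[i]
--         cnt[v] = cnt.get(v, 0) + 1
--     out = []
--     for x in R:
--         c = cnt.get(x, 0)
--         if c > 0:
--             cnt[x] = c - 1
--         else:
--             out.append(x)
--     return out
-- ===== Notes on version B (the rewrite author's own statement) =====
-- stated objective: faster
-- what changed: Replaces A's per-pair membership test plus first-occurrence rescan of R with a count table built once from M and a single left-to-right pass over R that skips an element while its remaining count is positive.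
import Mathlib
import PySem

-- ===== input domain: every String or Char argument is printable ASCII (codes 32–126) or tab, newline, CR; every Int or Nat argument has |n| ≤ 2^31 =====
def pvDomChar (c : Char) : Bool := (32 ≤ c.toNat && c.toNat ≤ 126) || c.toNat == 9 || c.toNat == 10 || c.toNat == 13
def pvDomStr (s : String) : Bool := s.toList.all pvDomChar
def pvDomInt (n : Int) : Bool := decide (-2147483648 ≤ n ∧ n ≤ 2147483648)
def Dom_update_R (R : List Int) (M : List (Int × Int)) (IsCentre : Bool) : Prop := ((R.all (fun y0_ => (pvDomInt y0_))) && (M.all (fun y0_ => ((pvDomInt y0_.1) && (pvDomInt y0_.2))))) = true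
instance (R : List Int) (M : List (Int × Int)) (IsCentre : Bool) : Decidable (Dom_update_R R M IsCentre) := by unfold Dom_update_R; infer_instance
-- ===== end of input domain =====

-- B replaces A's per-pair rescans of R with a count table from M and one pass over R (faster).


-- ===== PORT A =====
-- pairs[i] with i = 0 (IsCentre) or 1 (not IsCentre)
def keyA (IsCentre : Bool) (p : Int × Int) : Int := if IsCentre then p.1 else p.2

-- delete_element_from_list: scan for the first index with L[i] == x, return L[:i] + L[i+1:],
-- or L unchanged if no index matches; the index loop is ported as the obvious structural recursion.
def pyDeleteFirst (L : List Int) (x : Int) : List Int :=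
  match L with
  | [] => []
  | a :: t => if a = x then t else a :: pyDeleteFirst t x

-- A's `if R == None: return []` branch is unreachable in Python (R is always a list); omitted.
def update_R (R : List Int) (M : List (Int × Int)) (IsCentre : Bool) : List Int :=
  M.foldl (fun r p => if keyA IsCentre p ∈ r then pyDeleteFirst r (keyA IsCentre p) else r) R

-- ===== PORT B =====
-- one step of B's single pass over R: skip x and decrement while its remaining count is positive
def bStep (st : PySem.Dict Int Int × List Int) (x : Int) : PySem.Dict Int Int × List Int :=
  let c := st.1.getD x 0
  if 0 < c then (st.1.insert x (c - 1), st.2) else (st.1, st.2 ++ [x])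

def update_R_alt (R : List Int) (M : List (Int × Int)) (IsCentre : Bool) : List Int :=
  let cnt := M.foldl (fun d p => d.insert (keyA IsCentre p) (d.getD (keyA IsCentre p) 0 + 1))
      (PySem.Dict.empty : PySem.Dict Int Int)
  (R.foldl bStep (cnt, ([] : List Int))).2

-- ===== PRECONDITION & SPEC =====
def Spec_update_R (R : List Int) (M : List (Int × Int)) (IsCentre : Bool) (out : List Int) : Prop := out = update_R_alt R M IsCentre
instance (R : List Int) (M : List (Int × Int)) (IsCentre : Bool) (out : List Int) : Decidable (Spec_update_R R M IsCentre out) := by unfold Spec_update_R; infer_instance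

-- ===== CLAIM (what is proved, stated in full; the proofs are below) =====
def Claim_equal_update_R : Prop := ∀ (R : List Int) (M : List (Int × Int)) (IsCentre : Bool), Dom_update_R R M IsCentre → Spec_update_R R M IsCentre (update_R R M IsCentre)

-- ===== LEMMAS AND PROOFS =====

-- count-function view shared by both proofs
def bump (f : Int → Int) (v : Int) : Int → Int := fun y => if y = v then f y + 1 else f y

def cntF (k : Int × Int → Int) (M : List (Int × Int)) (f : Int → Int) : Int → Int :=
  M.foldl (fun g p => bump g (k p)) f

-- "skip each element while its count is positive" reference pass
def goSkip (f : Int → Int) : List Int → List Int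
  | [] => []
  | x :: t => if 0 < f x then goSkip (fun y => if y = x then f x - 1 else f y) t else x :: goSkip f t

theorem pyDeleteFirst_not_mem (L : List Int) (x : Int) (h : x ∉ L) : pyDeleteFirst L x = L := by
  induction L with
  | nil => rfl
  | cons a t ih =>
    simp only [List.mem_cons, not_or] at h
    simp [pyDeleteFirst, Ne.symm h.1, ih h.2]

theorem bump_comm (f : Int → Int) (v w : Int) : bump (bump f v) w = bump (bump f w) v := by
  funext y; simp only [bump]; split_ifs <;> omega

theorem cntF_bump (k : Int × Int → Int) (M : List (Int × Int)) (f : Int → Int) (v : Int) :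
    cntF k M (bump f v) = bump (cntF k M f) v := by
  induction M generalizing f with
  | nil => rfl
  | cons p t ih => simp only [cntF, List.foldl] at *; rw [bump_comm, ih]

theorem cntF_nonneg (k : Int × Int → Int) (M : List (Int × Int)) (f : Int → Int)
    (h : ∀ y, 0 ≤ f y) : ∀ y, 0 ≤ cntF k M f y := by
  induction M generalizing f with
  | nil => exact h
  | cons p t ih =>
    refine ih _ (fun y => ?_)
    simp only [bump]; split_ifs with hy
    · exact le_trans (h y) (by omega)
    · exact h y

theorem goSkip_zero (R : List Int) : goSkip (fun _ => 0) R = R := by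
  induction R with
  | nil => rfl
  | cons x t ih => simp [goSkip, ih]

theorem goSkip_delete (R : List Int) (f : Int → Int) (v : Int) (hf : ∀ y, 0 ≤ f y) :
    goSkip f (pyDeleteFirst R v) = goSkip (bump f v) R := by
  induction R generalizing f with
  | nil => rfl
  | cons x t ih =>
    by_cases hx : x = v
    · subst hx
      have h1 : pyDeleteFirst (x :: t) x = t := by simp [pyDeleteFirst]
      rw [h1]
      simp only [goSkip]
      have hpos : 0 < bump f x x := by
        unfold bump
        split_ifs with h
        · have := hf x; omega
        · exact absurd rfl h
      rw [if_pos hpos]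
      congr 1
      funext y
      by_cases hy : y = x <;> simp [bump, hy]
    · have h1 : pyDeleteFirst (x :: t) v = x :: pyDeleteFirst t v := by
        simp [pyDeleteFirst, hx]
      rw [h1]
      simp only [goSkip]
      have hbx : bump f v x = f x := by simp [bump, hx]
      rw [hbx]
      by_cases hfx : 0 < f x
      · rw [if_pos hfx, if_pos hfx]
        have hdec : ∀ y, 0 ≤ (fun y => if y = x then f x - 1 else f y) y := by
          intro y; dsimp only; split_ifs with h2
          · omega
          · exact hf y
        rw [ih _ hdec]
        congr 1
        funext y
        by_cases hy : y = x
        · subst hy; simp [bump, hx]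
        · have hvx : ¬ v = x := fun h => hx h.symm
          by_cases hv : y = v <;> simp [bump, hy, hv, hvx]
      · rw [if_neg hfx, if_neg hfx, ih f hf]

-- A's fold computes the reference pass with the counts of M
theorem update_R_eq_goSkip (M : List (Int × Int)) (R : List Int) (k : Int × Int → Int) :
    M.foldl (fun r p => if k p ∈ r then pyDeleteFirst r (k p) else r) R
      = goSkip (cntF k M (fun _ => 0)) R := by
  induction M generalizing R with
  | nil =>
    show R = goSkip (cntF k [] (fun _ => 0)) R
    have : cntF k [] (fun _ => 0) = (fun _ => (0 : Int)) := rfl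
    rw [this, goSkip_zero]
  | cons p t ih =>
    simp only [List.foldl]
    rw [ih]
    have hstep : (if k p ∈ R then pyDeleteFirst R (k p) else R) = pyDeleteFirst R (k p) := by
      split_ifs with h
      · rfl
      · exact (pyDeleteFirst_not_mem R (k p) h).symm
    rw [hstep, goSkip_delete R _ (k p) (cntF_nonneg k t _ (fun _ => le_refl 0))]
    congr 1
    show bump (cntF k t (fun _ => 0)) (k p) = cntF k (p :: t) (fun _ => 0)
    simp only [cntF, List.foldl]
    exact (cntF_bump k t _ (k p)).symm

-- B's counter dict realises cntF
theorem buildDict_getD (k : Int × Int → Int) (M : List (Int × Int)) (d : PySem.Dict Int Int) :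
    (fun y => (M.foldl (fun d p => d.insert (k p) (d.getD (k p) 0 + 1)) d).getD y 0)
      = cntF k M (fun y => d.getD y 0) := by
  induction M generalizing d with
  | nil => rfl
  | cons p t ih =>
    simp only [List.foldl, cntF] at *
    rw [ih]
    congr 1
    funext y
    rw [PySem.Dict.getD_insert]
    by_cases h : y = k p <;> simp [bump, h]

-- B's single pass realises the reference pass
theorem bPass_eq_goSkip (R : List Int) (d : PySem.Dict Int Int) (acc : List Int) :
    (R.foldl bStep (d, acc)).2 = acc ++ goSkip (fun y => d.getD y 0) R := by
  induction R generalizing d acc with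
  | nil => simp [goSkip]
  | cons x t ih =>
    simp only [List.foldl, bStep, goSkip]
    by_cases h : 0 < d.getD x 0
    · rw [if_pos h, if_pos h, ih]
      have heq : (fun y => (d.insert x (d.getD x 0 - 1)).getD y 0)
          = (fun y => if y = x then d.getD x 0 - 1 else d.getD y 0) := by
        funext y; rw [PySem.Dict.getD_insert]
      rw [heq]
    · rw [if_neg h, if_neg h, ih]
      simp

-- ===== VERDICT (by name: the statement is the Claim_ definition above) =====
theorem update_R_spec : Claim_equal_update_R := by
  intro R M IsCentre _
  show update_R R M IsCentre = update_R_alt R M IsCentre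
  unfold update_R update_R_alt
  rw [update_R_eq_goSkip M R (keyA IsCentre), bPass_eq_goSkip, List.nil_append,
      buildDict_getD (keyA IsCentre) M PySem.Dict.empty]
  have hzero : (fun y => (PySem.Dict.empty : PySem.Dict Int Int).getD y 0) = (fun _ => (0:Int)) := by
    funext y; simp [PySem.Dict.empty, PySem.Dict.getD, PySem.Dict.get?]
  rw [hzero]
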